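-- pv_equiv track=rewrite | github.com/Ghostmacc/superclaw | dashboard/sync-mission-data.py | build_activity
-- ===== SOURCE A (Python) =====
-- def build_activity(data):
--     activity = []
--     for entry in data.get("activities", []):
--         ts = entry.get("timestamp", "")
--         activity.append({
--             "agent": entry.get("agentId", "system"),
--             "text": entry.get("message", ""),
--             "time": ts.split("T")[1][:5] if "T" in ts else "",
--             "sort_ts": ts,
--         })
--
--     activity.sort(key=lambda x: x.get("sort_ts", ""), reverse=True)
--     for a in activity:
--         a.pop("sort_ts", None)
--     return activity[:20]
-- ===== SOURCE B (Python) =====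
-- def build_activity(data):
--     # Streaming bounded selection: one pass keeps at most the 20 newest entries
--     # in a descending-sorted buffer; never sorts the whole list.
--     top = []  # list of (ts, row), sorted by ts descending, stable, length <= 20
--     for entry in data.get("activities", []):
--         ts = entry.get("timestamp", "")
--         row = {
--             "agent": entry.get("agentId", "system"),
--             "text": entry.get("message", ""),
--             "time": ts.split("T")[1][:5] if "T" in ts else "",
--         }
--         i = 0
--         while i < len(top) and top[i][0] >= ts:
--             i += 1
--         top.insert(i, (ts, row))
--         del top[20:]
--     return [row for _, row in top]
-- ===== Notes on version B (the rewrite author's own statement) =====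
-- stated objective: alternative
-- what changed: B replaces A's build-all/full-sort/strip-key pipeline with a single streaming pass that keeps at most the 20 newest entries in a small descending-sorted buffer via bounded insertion, building each output dict as it goes and never materialising or sorting the whole list.
import Mathlib
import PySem

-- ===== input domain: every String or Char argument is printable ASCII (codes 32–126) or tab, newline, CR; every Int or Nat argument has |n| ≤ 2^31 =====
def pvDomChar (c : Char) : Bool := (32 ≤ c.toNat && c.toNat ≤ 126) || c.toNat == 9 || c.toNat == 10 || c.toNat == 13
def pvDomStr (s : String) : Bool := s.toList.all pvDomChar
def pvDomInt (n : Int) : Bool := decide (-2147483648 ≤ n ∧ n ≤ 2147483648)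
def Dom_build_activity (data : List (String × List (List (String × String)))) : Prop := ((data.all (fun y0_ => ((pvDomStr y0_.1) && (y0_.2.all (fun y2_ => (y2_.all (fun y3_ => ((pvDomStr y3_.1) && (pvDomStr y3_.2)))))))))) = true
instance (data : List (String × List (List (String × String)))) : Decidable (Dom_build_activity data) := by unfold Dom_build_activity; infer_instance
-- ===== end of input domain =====

-- B is a single streaming pass keeping at most the 20 newest rows in a small
-- descending-sorted buffer (bounded insertion), instead of A's build-all /
-- full-sort / strip-key pipeline; objective: alternative algorithm.

-- shared helper: d.get(k, dflt) — first matching key of the association list, else the default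
def dget {ν : Type} (d : List (String × ν)) (k : String) (dflt : ν) : ν :=
  match d.find? (fun p => p.1 == k) with
  | some p => p.2
  | none => dflt

-- shared helper: ts.split("T")[1][:5] if "T" in ts else ""
-- exact: when "T" in ts, split("T") has ≥ 2 parts so index 1 exists and the getD default is unreachable
def timeOf (ts : String) : String :=
  if PySem.Str.isIn "T" ts then
    PySem.Str.slice ((PySem.List.pyGet? ((PySem.Str.split? ts "T").getD []) 1).getD "") none (some 5)
  else ""

-- ===== PORT A =====
def build_activity (data : List (String × List (List (String × String)))) : List (List (String × String)) :=
  let activity := (dget data "activities" []).foldl (fun acc entry =>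
    let ts := dget entry "timestamp" ""
    acc ++ [[("agent", dget entry "agentId" "system"),
             ("text", dget entry "message" ""),
             ("time", timeOf ts),
             ("sort_ts", ts)]]) []
  let activity := PySem.List.sorted activity (fun x => dget x "sort_ts" "") true
  -- a.pop("sort_ts", None): remove the "sort_ts" key from each dict
  let activity := activity.map (fun a => a.filter (fun p => !(p.1 == "sort_ts")))
  PySem.List.slice activity none (some 20)

-- ===== PORT B =====
-- the while-loop insertion of Source B: walk past buffer entries with key ≥ ts, insert there
def insTop (ts : String) (row : List (String × String)) :
    List (String × List (String × String)) → List (String × List (String × String))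
  | [] => [(ts, row)]
  | (t, r) :: rest => if t < ts then (ts, row) :: (t, r) :: rest else (t, r) :: insTop ts row rest

def build_activity_alt (data : List (String × List (List (String × String)))) : List (List (String × String)) :=
  let top := (dget data "activities" []).foldl (fun top entry =>
    let ts := dget entry "timestamp" ""
    let row := [("agent", dget entry "agentId" "system"),
                ("text", dget entry "message" ""),
                ("time", timeOf ts)]
    (insTop ts row top).take 20) []   -- top.insert(i, (ts, row)); del top[20:]
  top.map (fun p => p.2)

-- ===== PRECONDITION & SPEC =====
def Spec_build_activity (data : List (String × List (List (String × String)))) (out : List (List (String × String))) : Prop := out = build_activity_alt data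
instance (data : List (String × List (List (String × String)))) (out : List (List (String × String))) : Decidable (Spec_build_activity data out) := by unfold Spec_build_activity; infer_instance

-- ===== CLAIM (what is proved, stated in full; the proofs are below) =====
def Claim_equal_build_activity : Prop := ∀ (data : List (String × List (List (String × String)))), Dom_build_activity data → Spec_build_activity data (build_activity data)

-- ===== LEMMAS AND PROOFS =====

-- append-accumulator loop is a map
theorem foldl_append_map {α β : Type} (g : α → β) :
    ∀ (l : List α) (acc : List β),
      l.foldl (fun acc e => acc ++ [g e]) acc = acc ++ l.map g := by
  intro l
  induction l with
  | nil => simp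
  | cons x t ih => intro acc; simp [List.foldl, ih]

-- Source B's insertion loop is insertBy with the descending comparison on the key
theorem insTop_eq_insertBy (ts : String) (row : List (String × String)) :
    ∀ (l : List (String × List (String × String))),
      insTop ts row l
        = PySem.List.insertBy (fun a b => decide (b.1 < a.1)) (ts, row) l := by
  intro l
  induction l with
  | nil => rfl
  | cons y t ih =>
    obtain ⟨ty, ry⟩ := y
    simp only [insTop, PySem.List.insertBy, ih, decide_eq_true_eq]

theorem insertBy_map {α β : Type} (f : α → β) (p : α → α → Bool) (q : β → β → Bool)
    (hq : ∀ a b, q (f a) (f b) = p a b) (x : α) :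
    ∀ (ys : List α),
      PySem.List.insertBy q (f x) (ys.map f) = (PySem.List.insertBy p x ys).map f := by
  intro ys
  induction ys with
  | nil => simp [PySem.List.insertBy]
  | cons y t ih =>
    simp only [List.map, PySem.List.insertBy, hq]
    by_cases h : p x y = true
    · simp [h]
    · simp [h, ih]

theorem foldl_insertBy_map {α β : Type} (f : α → β) (p : α → α → Bool) (q : β → β → Bool)
    (hq : ∀ a b, q (f a) (f b) = p a b) :
    ∀ (xs : List α) (acc : List α),
      (xs.map f).foldl (fun acc x => PySem.List.insertBy q x acc) (acc.map f)
        = (xs.foldl (fun acc x => PySem.List.insertBy p x acc) acc).map f := by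
  intro xs
  induction xs with
  | nil => simp
  | cons x t ih =>
    intro acc
    simp only [List.map, List.foldl]
    rw [insertBy_map f p q hq x acc]
    exact ih _

-- stable reverse key-sort commutes with mapping the elements, composing the key
theorem sorted_rev_map {α β κ : Type} [LT κ] [DecidableLT κ] (f : α → β) (key : β → κ)
    (xs : List α) :
    PySem.List.sorted (xs.map f) key true = (PySem.List.sorted xs (fun a => key (f a)) true).map f := by
  rw [PySem.List.sorted_rev_eq_foldl_insertBy, PySem.List.sorted_rev_eq_foldl_insertBy]
  have := foldl_insertBy_map f
      (fun a b => decide (key (f b) < key (f a)))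
      (fun a b => decide (key b < key a)) (fun a b => rfl) xs []
  simpa using this

-- truncating the buffer before inserting does not change the first k elements
theorem take_insertBy_take {α : Type} (q : α → α → Bool) (x : α) :
    ∀ (l : List α) (k : ℕ),
      (PySem.List.insertBy q x (l.take k)).take k = (PySem.List.insertBy q x l).take k := by
  intro l
  induction l with
  | nil => intro k; simp
  | cons y t ih =>
    intro k
    cases k with
    | zero => simp
    | succ m =>
      simp only [List.take]
      by_cases h : q x y = true
      · cases m with
        | zero => simp [PySem.List.insertBy, h]
        | succ j => simp [PySem.List.insertBy, h, List.take_take]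
      · simp only [PySem.List.insertBy, h, Bool.false_eq_true, if_false, List.take,
          List.cons.injEq, true_and]
        exact ih m

-- the bounded-insertion fold computes the first k of the full insertion sort
theorem foldl_trunc_insertBy {α : Type} (q : α → α → Bool) (k : ℕ) :
    ∀ (xs : List α) (acc : List α),
      xs.foldl (fun acc x => (PySem.List.insertBy q x acc).take k) (acc.take k)
        = (xs.foldl (fun acc x => PySem.List.insertBy q x acc) acc).take k := by
  intro xs
  induction xs with
  | nil => intro acc; rfl
  | cons x t ih =>
    intro acc
    simp only [List.foldl]
    rw [take_insertBy_take]
    exact ih (PySem.List.insertBy q x acc)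

-- ===== VERDICT (by name: the statement is the Claim_ definition above) =====
theorem build_activity_spec : Claim_equal_build_activity := by
  intro data _
  unfold Spec_build_activity build_activity build_activity_alt
  set acts := dget data "activities" [] with hacts
  -- per-entry builders: A's row (with sort_ts), B's row, and B's (key, row) pair
  set bA : List (String × String) → List (String × String) := fun entry =>
    [("agent", dget entry "agentId" "system"),
     ("text", dget entry "message" ""),
     ("time", timeOf (dget entry "timestamp" "")),
     ("sort_ts", dget entry "timestamp" "")] with hbA
  set bB : List (String × String) → List (String × String) := fun entry =>
    [("agent", dget entry "agentId" "system"),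
     ("text", dget entry "message" ""),
     ("time", timeOf (dget entry "timestamp" ""))] with hbB
  set f : List (String × String) → String × List (String × String) := fun entry =>
    (dget entry "timestamp" "", bB entry) with hf
  -- A's side: build-all, sort, strip, slice  =  map bB (take 20 (sorted acts by timestamp))
  have h1 : acts.foldl (fun acc entry =>
      acc ++ [[("agent", dget entry "agentId" "system"),
               ("text", dget entry "message" ""),
               ("time", timeOf (dget entry "timestamp" "")),
               ("sort_ts", dget entry "timestamp" "")]]) [] = acts.map bA := by
    simpa using foldl_append_map bA acts []
  simp only [h1]
  rw [sorted_rev_map bA (fun x => dget x "sort_ts" "") acts]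
  have hkey : (fun a => dget (bA a) "sort_ts" "") = (fun e => dget e "timestamp" "") := by
    funext a; simp [hbA, dget, List.find?]
  rw [hkey]
  set s := PySem.List.sorted acts (fun e => dget e "timestamp" "") true with hs
  have hpop : (s.map bA).map (fun a => a.filter (fun p => !(p.1 == "sort_ts"))) = s.map bB := by
    simp only [List.map_map]
    apply List.map_congr_left
    intro a _
    simp [hbA, hbB, List.filter]
  rw [hpop]
  have hslice : ∀ (l : List (List (String × String))),
      PySem.List.slice l none (some 20) = l.take 20 := by
    intro l
    have := PySem.List.slice_to l (b := 20) (by norm_num)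
    simpa using this
  rw [hslice]
  -- B's side: the bounded-insertion fold is take 20 of the insertion sort of the pairs
  have h2 : acts.foldl (fun top entry =>
        (insTop (dget entry "timestamp" "")
          [("agent", dget entry "agentId" "system"),
           ("text", dget entry "message" ""),
           ("time", timeOf (dget entry "timestamp" ""))] top).take 20) []
      = (acts.foldl (fun acc e =>
          PySem.List.insertBy (fun a b => decide (b.1 < a.1)) (f e) acc) []).take 20 := by
    have hstep : (fun (top : List (String × List (String × String))) entry =>
        (insTop (dget entry "timestamp" "")
          [("agent", dget entry "agentId" "system"),
           ("text", dget entry "message" ""),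
           ("time", timeOf (dget entry "timestamp" ""))] top).take 20)
      = (fun top e => (PySem.List.insertBy (fun a b => decide (b.1 < a.1)) (f e) top).take 20) := by
      funext top e
      rw [insTop_eq_insertBy]
    rw [hstep]
    have := foldl_trunc_insertBy (α := String × List (String × String))
      (fun a b => decide (b.1 < a.1)) 20 (acts.map fun e => f e) []
    calc acts.foldl (fun top e => (PySem.List.insertBy (fun a b => decide (b.1 < a.1)) (f e) top).take 20) []
        = (acts.map f).foldl (fun top x => (PySem.List.insertBy (fun a b => decide (b.1 < a.1)) x top).take 20) [] := by
          rw [List.foldl_map]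
      _ = ((acts.map f).foldl (fun acc x => PySem.List.insertBy (fun a b => decide (b.1 < a.1)) x acc) []).take 20 := by
          simpa using this
      _ = (acts.foldl (fun acc e => PySem.List.insertBy (fun a b => decide (b.1 < a.1)) (f e) acc) []).take 20 := by
          rw [List.foldl_map]
  simp only [h2]
  -- the insertion-sort of the pairs is the map of the sorted entries
  have h3 : acts.foldl (fun acc e =>
        PySem.List.insertBy (fun a b => decide (b.1 < a.1)) (f e) acc) []
      = s.map f := by
    rw [hs, ← sorted_rev_map f Prod.fst acts]
    · rw [PySem.List.sorted_rev_eq_foldl_insertBy, List.foldl_map]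
  rw [h3]
  conv_rhs => rw [← List.map_take]
  rw [List.map_map, show ((fun p : String × List (String × String) => p.2) ∘ f) = bB from rfl,
    List.map_take]
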